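-- pv_equiv track=rewrite | github.com/russellmiller49/proc_suite_deploy | app/registry/processing/masking.py | _mask_spans
-- ===== SOURCE A (Python) =====
-- def _mask_spans(text: str, spans: list[tuple[int, int]]) -> str:
--     if not spans:
--         return text
--     masked = list(text)
--     text_len = len(masked)
--     for start, end in spans:
--         if start >= text_len or end <= 0:
--             continue
--         s = max(0, start)
--         e = min(text_len, end)
--         for idx in range(s, e):
--             if masked[idx] != "\n":
--                 masked[idx] = " "
--     return "".join(masked)
-- ===== SOURCE B (Python) =====
-- def _mask_spans(text: str, spans: list[tuple[int, int]]) -> str: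
--     n = len(text)
--     ivs = sorted(((max(0, s), min(n, e)) for s, e in spans if max(0, s) < min(n, e)),
--                  key=lambda iv: iv[0])
--     pieces = []
--     pos = 0
--     for s, e in ivs:
--         if e <= pos:
--             continue
--         s = max(s, pos)
--         pieces.append(text[pos:s])
--         pieces.append(''.join('\n' if c == '\n' else ' ' for c in text[s:e]))
--         pos = e
--     pieces.append(text[pos:])
--     return ''.join(pieces)
-- ===== Notes on version B (the rewrite author's own statement) =====
-- stated objective: faster
-- what changed: B replaces A's per-span in-place character rewriting with an interval sweep: it clamps spans and drops empty ones, sorts the intervals by start, then sweeps once left-to-right emitting untouched gap slices and newline-preserving blanked slices, joining the pieces.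
import Mathlib
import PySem

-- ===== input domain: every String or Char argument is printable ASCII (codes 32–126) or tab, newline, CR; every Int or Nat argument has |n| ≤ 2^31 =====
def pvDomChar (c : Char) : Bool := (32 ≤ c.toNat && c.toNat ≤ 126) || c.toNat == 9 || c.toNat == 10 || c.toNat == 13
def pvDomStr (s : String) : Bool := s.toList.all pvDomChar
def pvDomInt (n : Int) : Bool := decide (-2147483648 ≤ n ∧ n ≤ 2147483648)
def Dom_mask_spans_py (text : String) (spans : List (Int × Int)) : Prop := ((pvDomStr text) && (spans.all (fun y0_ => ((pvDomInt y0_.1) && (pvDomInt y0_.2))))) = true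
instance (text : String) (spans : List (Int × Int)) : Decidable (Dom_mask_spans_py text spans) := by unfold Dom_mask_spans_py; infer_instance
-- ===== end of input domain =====

-- B replaces A's per-span in-place character rewriting with an interval sweep (clamp, drop
-- empty, sort by start, one left-to-right pass emitting gap slices and blanked slices);
-- intended faster via bulk slicing; same exact return value. A mutates no caller-visible argument.

-- ===== PORT A =====
-- inner loop body of A: 'if masked[idx] != "\n": masked[idx] = " "' (idx always in range here)
def maskLoopA (m : List Char) (idx : Int) : List Char :=
  if PySem.List.pyGetD m idx ' ' ≠ '\n' then PySem.List.pySetD m idx ' ' else m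

def mask_spans_py (text : String) (spans : List (Int × Int)) : String :=
  if spans = [] then text
  else
    let masked := text.toList
    let text_len : Int := PySem.List.len masked
    let masked := spans.foldl (fun m se =>
      if se.1 ≥ text_len ∨ se.2 ≤ 0 then m
      else
        let s := max 0 se.1
        let e := min text_len se.2
        (PySem.List.pyRange s e 1).foldl maskLoopA m) masked
    -- "".join of a list of single characters = the string of those characters (exact)
    String.ofList masked

-- ===== PORT B =====
-- loop body of B's sweep: state = (pieces, pos); emit the untouched gap text[pos:max(s,pos)]
-- and the blanked slice text[max(s,pos):e], advance pos to e
def stepB (chars : List Char) (st : List (List Char) × Int) (se : Int × Int) : List (List Char) × Int :=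
  if se.2 ≤ st.2 then st
  else
    let s := max se.1 st.2
    (st.1 ++ [PySem.List.slice chars (some st.2) (some s),
              (PySem.List.slice chars (some s) (some se.2)).map
                (fun c => if c = '\n' then '\n' else ' ')], se.2)

def mask_spans_py_alt (text : String) (spans : List (Int × Int)) : String :=
  let chars := text.toList
  let n : Int := PySem.List.len chars
  let ivs := PySem.List.sorted
    ((spans.filter (fun se => decide (max 0 se.1 < min n se.2))).map
      (fun se => (max 0 se.1, min n se.2))) (fun iv => iv.1) false
  let st := ivs.foldl (stepB chars) ([], 0)
  -- ''.join(pieces) of the emitted string pieces = flatten of the char-list pieces (exact)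
  String.ofList ((st.1 ++ [PySem.List.slice chars (some st.2) none]).flatten)

-- ===== PRECONDITION & SPEC =====
def Spec_mask_spans_py (text : String) (spans : List (Int × Int)) (out : String) : Prop := out = mask_spans_py_alt text spans
instance (text : String) (spans : List (Int × Int)) (out : String) : Decidable (Spec_mask_spans_py text spans out) := by unfold Spec_mask_spans_py; infer_instance

-- ===== CLAIM (what is proved, stated in full; the proofs are below) =====
def Claim_equal_mask_spans_py : Prop := ∀ (text : String) (spans : List (Int × Int)), Dom_mask_spans_py text spans → Spec_mask_spans_py text spans (mask_spans_py text spans)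

-- ===== LEMMAS AND PROOFS =====

-- what A does to one masked cell
def gC (c : Char) : Char := if c ≠ '\n' then ' ' else c

-- value of one output cell given whether it is covered
def emitf (b : Bool) (c : Char) : Char := if b then gC c else c

-- index i is covered by some (start, end) interval of l
def covers (l : List (Int × Int)) (i : Nat) : Bool :=
  l.any (fun se => decide (se.1 ≤ (i : Int) ∧ (i : Int) < se.2))

-- the common target: the tail of chars from position p, each cell emitted by coverage
def tgtB (chars : List Char) (l : List (Int × Int)) (p : Nat) : List Char :=
  ((chars.drop p).zipIdx p).map (fun q => emitf (covers l q.2) q.1)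

-- B's sweep written as suffix recursion (the foldl with pieces accumulator equals this)
def goB (chars : List Char) : List (Int × Int) → Int → List Char
  | [], pos => PySem.List.slice chars (some pos) none
  | se :: r, pos =>
    if se.2 ≤ pos then goB chars r pos
    else PySem.List.slice chars (some pos) (some (max se.1 pos)) ++
      (PySem.List.slice chars (some (max se.1 pos)) (some se.2)).map
        (fun c => if c = '\n' then '\n' else ' ') ++
      goB chars r se.2

lemma gC_emitf (b : Bool) (c : Char) : gC (emitf b c) = gC c := by
  cases b
  · simp [emitf]
  · simp only [emitf, gC]
    split <;> simp_all

lemma length_maskLoopA (m : List Char) (idx : Int) : (maskLoopA m idx).length = m.length := by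
  unfold maskLoopA; split <;> simp [PySem.List.length_pySetD]

lemma length_foldl_maskLoopA (l : List Int) (m : List Char) :
    (l.foldl maskLoopA m).length = m.length := by
  induction l generalizing m with
  | nil => rfl
  | cons x l ih => simp [List.foldl_cons, ih, length_maskLoopA]

lemma innerA_getElem? (k : Nat) : ∀ (s e : Int), (e - s).toNat = k →
    ∀ (m : List Char), 0 ≤ s → e ≤ (m.length : Int) → ∀ (i : Nat) (hi : i < m.length),
    ((PySem.List.pyRange s e 1).foldl maskLoopA m)[i]? =
      some (if s ≤ (i : Int) ∧ (i : Int) < e then gC (m[i]'hi) else m[i]'hi) := by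
  induction k with
  | zero =>
    intro s e hk m hs he i hi
    rw [PySem.List.pyRange_one_eq_nil (by omega), List.foldl_nil,
      List.getElem?_eq_getElem hi, if_neg (by omega)]
  | succ k ih =>
    intro s e hk m hs he i hi
    have hse : s < e := by omega
    rw [PySem.List.pyRange_one_cons hse, List.foldl_cons]
    have hsn : s.toNat < m.length := by omega
    have hstep : maskLoopA m s = if m[s.toNat] ≠ '\n' then m.set s.toNat ' ' else m := by
      unfold maskLoopA
      rw [PySem.List.pyGetD_eq_getElem m ' ' hs (by omega),
        PySem.List.pySetD_of_nonneg m ' ' hs]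
    have hlen : (maskLoopA m s).length = m.length := length_maskLoopA m s
    have hi' : i < (maskLoopA m s).length := by omega
    rw [ih (s + 1) e (by omega) (maskLoopA m s) (by omega) (by rw [hlen]; exact he) i hi']
    congr 1
    have hmi : (maskLoopA m s)[i]'hi' = if i = s.toNat then gC (m[i]'hi) else m[i]'hi := by
      simp only [hstep]
      split
      next hc =>
        by_cases hieq : i = s.toNat
        · subst hieq; simp [gC, hc]
        · simp [hieq, Ne.symm hieq]
      next hc =>
        by_cases hieq : i = s.toNat
        · subst hieq; simp [gC, not_not.mp hc]
        · simp [hieq]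
    rw [hmi]
    by_cases hieq : i = s.toNat
    · rw [if_neg (by omega), if_pos hieq, if_pos (by omega)]
    · rw [if_neg hieq]
      by_cases hin : s + 1 ≤ (i : Int) ∧ (i : Int) < e
      · rw [if_pos hin, if_pos (by omega)]
      · rw [if_neg hin, if_neg (by omega)]

-- A's whole span loop, pointwise: start from cells 'emitf (f i)', end at 'emitf (f i || covers)'
lemma A_fold (chars : List Char) :
    ∀ (spans : List (Int × Int)) (f : Nat → Bool) (m : List Char), m.length = chars.length →
    (∀ (i : Nat) (hi : i < chars.length), m[i]? = some (emitf (f i) (chars[i]'hi))) →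
    ∀ (i : Nat) (hi : i < chars.length),
    (spans.foldl (fun m se =>
      if se.1 ≥ (chars.length : Int) ∨ se.2 ≤ 0 then m
      else (PySem.List.pyRange (max 0 se.1) (min (chars.length : Int) se.2) 1).foldl maskLoopA m)
      m)[i]? = some (emitf (f i || covers spans i) (chars[i]'hi)) := by
  intro spans
  induction spans with
  | nil => intro f m hlen hm i hi; simpa [covers] using hm i hi
  | cons se rest ih =>
    intro f m hlen hm i hi
    simp only [List.foldl_cons]
    have hcov : covers (se :: rest) i =
        (decide (se.1 ≤ (i : Int) ∧ (i : Int) < se.2) || covers rest i) := by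
      simp [covers]
    by_cases hg : se.1 ≥ (chars.length : Int) ∨ se.2 ≤ 0
    · rw [if_pos hg]
      have : (f i || covers (se :: rest) i) = (f i || covers rest i) := by
        rw [hcov, decide_eq_false (by omega)]; simp
      rw [this]
      exact ih f m hlen hm i hi
    · rw [if_neg hg]
      have hres := ih (fun j => f j || decide (se.1 ≤ (j : Int) ∧ (j : Int) < se.2))
        ((PySem.List.pyRange (max 0 se.1) (min (chars.length : Int) se.2) 1).foldl maskLoopA m)
        (by rw [length_foldl_maskLoopA]; exact hlen)
        (fun j hj => by
          have hjm : j < m.length := by omega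
          rw [innerA_getElem? ((min (chars.length : Int) se.2 - max 0 se.1).toNat)
            (max 0 se.1) (min (chars.length : Int) se.2) rfl m (le_max_left _ _)
            (by omega) j hjm]
          have hmj : m[j]'hjm = emitf (f j) (chars[j]'hj) := by
            have := hm j hj
            rw [List.getElem?_eq_getElem hjm] at this
            exact Option.some.inj this
          rw [hmj]
          by_cases hc : se.1 ≤ (j : Int) ∧ (j : Int) < se.2
          · rw [if_pos (by omega), gC_emitf]
            simp [emitf, hc]
          · rw [if_neg (by omega)]
            simp [emitf, hc])
        i hi
      rw [hres, hcov]
      congr 2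
      cases f i <;> simp

-- joining B's foldl state equals the suffix recursion goB
lemma B_fold_join (chars : List Char) :
    ∀ (ivs : List (Int × Int)) (ps : List (List Char)) (pos : Int),
    (((ivs.foldl (stepB chars) (ps, pos)).1 ++
        [PySem.List.slice chars (some (ivs.foldl (stepB chars) (ps, pos)).2) none]).flatten)
      = ps.flatten ++ goB chars ivs pos := by
  intro ivs
  induction ivs with
  | nil => intro ps pos; simp [goB]
  | cons se r ih =>
    intro ps pos
    simp only [List.foldl_cons, goB]
    by_cases hg : se.2 ≤ pos
    · rw [if_pos hg]
      show (((r.foldl (stepB chars) (stepB chars (ps, pos) se)).1 ++ _).flatten) = _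
      rw [show stepB chars (ps, pos) se = (ps, pos) by simp [stepB, hg]]
      exact ih ps pos
    · rw [if_neg hg]
      show (((r.foldl (stepB chars) (stepB chars (ps, pos) se)).1 ++ _).flatten) = _
      rw [show stepB chars (ps, pos) se =
        (ps ++ [PySem.List.slice chars (some pos) (some (max se.1 pos)),
           (PySem.List.slice chars (some (max se.1 pos)) (some se.2)).map
             (fun c => if c = '\n' then '\n' else ' ')], se.2) by simp [stepB, hg]]
      rw [ih]
      simp

lemma tgt_congr (chars : List Char) (l₁ l₂ : List (Int × Int)) (p : Nat)
    (h : ∀ i : Nat, p ≤ i → covers l₁ i = covers l₂ i) :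
    tgtB chars l₁ p = tgtB chars l₂ p := by
  unfold tgtB
  apply List.map_congr_left
  intro q hq
  have := List.mem_zipIdx hq
  rw [h q.2 (by omega)]

-- splitting the target at a cut point a
lemma tgt_split (chars : List Char) (l : List (Int × Int)) (p a : Nat)
    (hpa : p ≤ a) (han : a ≤ chars.length) :
    tgtB chars l p =
      (((chars.drop p).take (a - p)).zipIdx p).map (fun q => emitf (covers l q.2) q.1) ++
      tgtB chars l a := by
  unfold tgtB
  conv_lhs => rw [← List.take_append_drop (a - p) (chars.drop p)]
  rw [List.zipIdx_append, List.map_append]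
  have h2 : p + ((chars.drop p).take (a - p)).length = a := by
    simp [List.length_take, List.length_drop]; omega
  rw [h2, List.drop_drop, show p + (a - p) = a from by omega]

-- a chunk on which coverage is constantly false passes through unchanged
lemma tgt_chunk_false (l : List (Int × Int)) (chunk : List Char) (p : Nat)
    (h : ∀ i : Nat, p ≤ i → i < p + chunk.length → covers l i = false) :
    (chunk.zipIdx p).map (fun q => emitf (covers l q.2) q.1) = chunk := by
  have : (chunk.zipIdx p).map (fun q => emitf (covers l q.2) q.1)
      = (chunk.zipIdx p).map (fun q => q.1) := by
    apply List.map_congr_left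
    intro q hq
    have := List.mem_zipIdx hq
    rw [h q.2 (by omega) (by omega)]
    rfl
  rw [this]
  exact List.zipIdx_map_fst p chunk

-- a chunk on which coverage is constantly true is blanked cellwise
lemma tgt_chunk_true (l : List (Int × Int)) (chunk : List Char) (p : Nat)
    (h : ∀ i : Nat, p ≤ i → i < p + chunk.length → covers l i = true) :
    (chunk.zipIdx p).map (fun q => emitf (covers l q.2) q.1) =
      chunk.map (fun c => if c = '\n' then '\n' else ' ') := by
  have h1 : (chunk.zipIdx p).map (fun q => emitf (covers l q.2) q.1)
      = (chunk.zipIdx p).map (fun q => (fun c => if c = '\n' then '\n' else ' ') q.1) := by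
    apply List.map_congr_left
    intro q hq
    have := List.mem_zipIdx hq
    rw [h q.2 (by omega) (by omega)]
    simp [emitf, gC]
    split <;> simp_all
  have h2 : (chunk.zipIdx p).map (fun q => (fun c => if c = '\n' then '\n' else ' ') q.1)
      = ((chunk.zipIdx p).map Prod.fst).map (fun c => if c = '\n' then '\n' else ' ') := by
    rw [List.map_map]; rfl
  rw [h1, h2, List.zipIdx_map_fst]

-- the sweep computes the coverage-mask target, for clamped sorted intervals
lemma goB_tgt (chars : List Char) :
    ∀ (ivs : List (Int × Int)), ivs.Pairwise (fun a b => a.1 ≤ b.1) →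
    (∀ iv ∈ ivs, 0 ≤ iv.1 ∧ iv.1 < iv.2 ∧ iv.2 ≤ (chars.length : Int)) →
    ∀ (pos : Int), 0 ≤ pos → pos ≤ (chars.length : Int) →
    goB chars ivs pos = tgtB chars ivs pos.toNat := by
  intro ivs
  induction ivs with
  | nil =>
    intro _ _ pos h0 hn
    unfold goB
    rw [PySem.List.slice_from _ h0]
    exact (tgt_chunk_false [] _ _ (by simp [covers])).symm
  | cons se r ih =>
    intro hsort hbd pos h0 hn
    have hse := hbd se (by simp)
    have hr : ∀ iv ∈ r, 0 ≤ iv.1 ∧ iv.1 < iv.2 ∧ iv.2 ≤ (chars.length : Int) :=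
      fun iv hiv => hbd iv (by simp [hiv])
    have hsort' := (List.pairwise_cons.mp hsort)
    unfold goB
    by_cases hg : se.2 ≤ pos
    · rw [if_pos hg, ih hsort'.2 hr pos h0 hn]
      apply tgt_congr
      intro i hi
      simp only [covers, List.any_cons]
      rw [decide_eq_false (by omega)]
      simp
    · rw [if_neg hg]
      have hs0 : 0 ≤ max se.1 pos := by omega
      have hsn : max se.1 pos ≤ (chars.length : Int) := by omega
      have hrec := ih hsort'.2 hr se.2 (by omega) (by omega)
      rw [hrec]
      rw [tgt_split chars (se :: r) pos.toNat (max se.1 pos).toNat (by omega) (by omega)]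
      rw [tgt_split chars (se :: r) (max se.1 pos).toNat se.2.toNat (by omega) (by omega)]
      have hc1 : (((chars.drop pos.toNat).take ((max se.1 pos).toNat - pos.toNat)).zipIdx
          pos.toNat).map (fun q => emitf (covers (se :: r) q.2) q.1)
          = PySem.List.slice chars (some pos) (some (max se.1 pos)) := by
        rw [tgt_chunk_false]
        · rw [PySem.List.slice_toNat _ h0 hs0]
        · intro i hlo hhi
          simp only [List.length_take, List.length_drop] at hhi
          have hi' : (i : Int) < max se.1 pos := by omega
          simp only [covers, List.any_cons]
          rw [decide_eq_false (by omega)]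
          simp only [Bool.false_or]
          apply List.any_eq_false.mpr
          intro iv hiv
          have h1 := hsort'.1 iv hiv
          simp
          omega
      have hc2 : (((chars.drop (max se.1 pos).toNat).take
          (se.2.toNat - (max se.1 pos).toNat)).zipIdx (max se.1 pos).toNat).map
            (fun q => emitf (covers (se :: r) q.2) q.1)
          = (PySem.List.slice chars (some (max se.1 pos)) (some se.2)).map
              (fun c => if c = '\n' then '\n' else ' ') := by
        rw [tgt_chunk_true]
        · rw [PySem.List.slice_toNat _ hs0 (by omega)]
        · intro i hlo hhi
          simp only [List.length_take, List.length_drop] at hhi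
          simp only [covers, List.any_cons]
          rw [decide_eq_true (by omega)]
          simp
      rw [hc1, hc2, List.append_assoc]
      congr 2
      apply tgt_congr
      intro i hi
      simp only [covers, List.any_cons]
      rw [decide_eq_false (by omega)]
      simp

-- coverage is invariant under clamp+filter (on in-range indices) and under sorting
lemma covers_clamped (n : Int) (spans : List (Int × Int)) (i : Nat)
    (hn : (i : Int) < n) :
    covers ((spans.filter (fun se => decide (max 0 se.1 < min n se.2))).map
      (fun se => (max 0 se.1, min n se.2))) i = covers spans i := by
  simp only [covers, List.any_map, List.any_filter]
  apply PySem.List.any_congr_mem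
  intro se _
  simp only [Function.comp]
  by_cases hc : se.1 ≤ (i : Int) ∧ (i : Int) < se.2
  · rw [decide_eq_true hc, decide_eq_true (by omega), decide_eq_true (by omega)]; rfl
  · rw [decide_eq_false hc]
    by_cases hg : max 0 se.1 < min n se.2
    · rw [decide_eq_true hg, decide_eq_false (by omega)]; rfl
    · rw [decide_eq_false hg]; rfl

lemma covers_perm (l₁ l₂ : List (Int × Int)) (h : l₁.Perm l₂) (i : Nat) :
    covers l₁ i = covers l₂ i := by unfold covers; exact List.Perm.any_eq h

-- length and cells of the target at p = 0
lemma tgt_zero_getElem? (chars : List Char) (l : List (Int × Int)) (i : Nat) :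
    (tgtB chars l 0)[i]? = chars[i]?.map (fun c => emitf (covers l i) c) := by
  unfold tgtB
  rw [List.drop_zero, List.getElem?_map, List.getElem?_zipIdx]
  cases h : chars[i]? <;> simp

lemma tgt_zero_length (chars : List Char) (l : List (Int × Int)) :
    (tgtB chars l 0).length = chars.length := by
  simp [tgtB]

-- ===== VERDICT (by name: the statement is the Claim_ definition above) =====
theorem mask_spans_py_spec : Claim_equal_mask_spans_py := by
  intro text spans _
  unfold Spec_mask_spans_py
  simp only [mask_spans_py, mask_spans_py_alt]
  set chars := text.toList with hchars
  have hlen : PySem.List.len chars = (chars.length : Int) := by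
    simp [PySem.List.len_eq]
  set clamped := (spans.filter
      (fun se => decide (max 0 (se.1) < min (PySem.List.len chars) se.2))).map
      (fun se => (max 0 se.1, min (PySem.List.len chars) se.2)) with hclamped
  set ivs := PySem.List.sorted clamped (fun iv => iv.1) false with hivs
  have hbd : ∀ iv ∈ ivs, 0 ≤ iv.1 ∧ iv.1 < iv.2 ∧ iv.2 ≤ (chars.length : Int) := by
    intro iv hiv
    have := (PySem.List.mem_sorted _ _ _ _).mp hiv
    rw [hclamped] at this
    obtain ⟨se, hse, heq⟩ := List.mem_map.mp this
    have hf := List.of_mem_filter hse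
    rw [← heq]
    simp at hf ⊢
    omega
  have hsorted : ivs.Pairwise (fun a b => a.1 ≤ b.1) :=
    PySem.List.sorted_pairwise clamped (fun iv => iv.1)
  have hB : (((ivs.foldl (stepB chars) ([], 0)).1 ++
      [PySem.List.slice chars (some (ivs.foldl (stepB chars) ([], 0)).2) none]).flatten)
      = tgtB chars ivs 0 := by
    have h1 := B_fold_join chars ivs [] 0
    rw [h1]
    simp only [List.flatten_nil, List.nil_append]
    have := goB_tgt chars ivs hsorted hbd 0 le_rfl (by positivity)
    simpa using this
  have hcov : ∀ i : Nat, i < chars.length → covers ivs i = covers spans i := by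
    intro i hi
    rw [covers_perm ivs clamped (PySem.List.sorted_perm clamped _ _) i]
    rw [hclamped, hlen]
    exact covers_clamped _ spans i (by omega)
  by_cases hsp : spans = []
  · subst hsp
    rw [if_pos rfl]
    have hivsnil : ivs = [] := by
      rw [hivs, PySem.List.sorted_eq_nil_iff, hclamped]; simp
    rw [hB, hivsnil]
    have htgt : tgtB chars ([] : List (Int × Int)) 0 = chars := by
      apply List.ext_getElem?
      intro i
      rw [tgt_zero_getElem?]
      cases h : chars[i]? <;> simp [covers, emitf]
    rw [htgt, hchars, String.ofList_toList]
  · rw [if_neg hsp, hB]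
    congr 1
    apply List.ext_getElem?
    intro i
    by_cases hi : i < chars.length
    · have hA := A_fold chars spans (fun _ => false) chars rfl
        (fun j hj => by rw [List.getElem?_eq_getElem hj]; rfl) i hi
      rw [hlen]
      rw [hA, tgt_zero_getElem?, hcov i hi, List.getElem?_eq_getElem hi]
      simp
    · rw [List.getElem?_eq_none, List.getElem?_eq_none]
      · rw [tgt_zero_length]; omega
      · have : ∀ (l : List (Int × Int)) (m : List Char),
            (l.foldl (fun m se =>
              if se.1 ≥ (chars.length : Int) ∨ se.2 ≤ 0 then m
              else (PySem.List.pyRange (max 0 se.1) (min (chars.length : Int) se.2) 1).foldl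
                maskLoopA m) m).length = m.length := by
          intro l
          induction l with
          | nil => intro m; rfl
          | cons x l ih =>
            intro m
            simp only [List.foldl_cons]
            rw [ih]
            split
            · rfl
            · exact length_foldl_maskLoopA _ _
        rw [hlen]
        rw [this spans chars]
        omega
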